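-- pv_equiv track=rewrite | github.com/moliveri1618/TD_MatchPDF_backend | TD_MatchPDF_backend_project/utils.py | rename_pos_cliente2
-- ===== SOURCE A (Python) =====
-- def rename_pos_cliente2(data):
--     # Count the occurrences of 'F1sxLavand'
--     count = sum(1 for item in data if item['pos_cliente'] == 'F1sxLavand')
--
--     # If there's more than one 'F1sxLavand', proceed with renaming
--     if count > 1:
--         counter = 1
--         for item in data:
--             if item['pos_cliente'] == 'F1sxLavand':
--                 item['pos_cliente'] = f'F1sxLavand{counter}'
--                 counter += 1
--
--     return data
-- ===== SOURCE B (Python) =====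
-- def rename_pos_cliente2(data):
--     # Single speculative pass: build a renamed copy of the list while counting
--     # matches; return the copy only if there was more than one match.
--     # (Does not mutate the input dicts, unlike A; return value is identical.)
--     out = []
--     n = 0
--     for item in data:
--         if item['pos_cliente'] == 'F1sxLavand':
--             n += 1
--             out.append({**item, 'pos_cliente': f'F1sxLavand{n}'})
--         else:
--             out.append(item)
--     return out if n > 1 else data
-- ===== Notes on version B (the rewrite author's own statement) =====
-- stated objective: alternative
-- what changed: B is a single speculative pass that builds a renamed copy while counting matches and returns the copy only if more than one match was seen, instead of A's count-over-all pass followed by a guarded in-place rewrite pass; B does not mutate the input dicts (return value is identical).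
import Mathlib
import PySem

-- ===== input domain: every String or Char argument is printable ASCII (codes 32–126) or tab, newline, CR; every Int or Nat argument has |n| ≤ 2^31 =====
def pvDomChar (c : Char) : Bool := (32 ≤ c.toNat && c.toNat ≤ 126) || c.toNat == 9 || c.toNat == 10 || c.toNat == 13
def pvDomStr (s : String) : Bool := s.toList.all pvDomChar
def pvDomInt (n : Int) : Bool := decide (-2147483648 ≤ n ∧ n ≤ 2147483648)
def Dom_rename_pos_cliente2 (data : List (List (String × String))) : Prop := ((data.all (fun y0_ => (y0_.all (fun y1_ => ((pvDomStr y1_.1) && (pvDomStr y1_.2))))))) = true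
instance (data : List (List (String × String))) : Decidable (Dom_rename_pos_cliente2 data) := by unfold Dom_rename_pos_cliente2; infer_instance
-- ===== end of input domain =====

-- B is one speculative pass (build a renamed copy while counting, keep it only if >1 match);
-- the RETURN value is proved equal — A mutates the input dicts in place, B does not.

-- ===== PORT A =====
-- item['pos_cliente'] == 'F1sxLavand' (Pre_ guarantees the key is present, so getD's default is never read)
def pvIsMatch (item : List (String × String)) : Bool :=
  (PySem.Dict.mk item).getD "pos_cliente" "" == "F1sxLavand"

-- the dict with pos_cliente set to f'F1sxLavand{i}' (key overwritten in place)
def pvRenamed (item : List (String × String)) (i : Int) : List (String × String) :=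
  ((PySem.Dict.mk item).insert "pos_cliente" ("F1sxLavand" ++ PySem.Int.toStr i)).items

-- A's second pass: 'for item in data:' with its running counter
def pvALoop : List (List (String × String)) → Int → List (List (String × String))
  | [], _ => []
  | item :: rest, counter =>
    if pvIsMatch item then pvRenamed item counter :: pvALoop rest (counter + 1)
    else item :: pvALoop rest counter

def rename_pos_cliente2 (data : List (List (String × String))) : List (List (String × String)) :=
  -- count = sum(1 for item in data if item['pos_cliente'] == 'F1sxLavand')
  let count : Int := data.foldl (fun acc item => if pvIsMatch item then acc + 1 else acc) 0
  if count > 1 then pvALoop data 1 else data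

-- ===== PORT B =====
-- B's single loop: returns (out, n) — the speculatively renamed copy and the match count
def pvBLoop : List (List (String × String)) → Int → List (List (String × String)) × Int
  | [], n => ([], n)
  | item :: rest, n =>
    if pvIsMatch item then
      let r := pvBLoop rest (n + 1)
      (pvRenamed item (n + 1) :: r.1, r.2)
    else
      let r := pvBLoop rest n
      (item :: r.1, r.2)

def rename_pos_cliente2_alt (data : List (List (String × String))) : List (List (String × String)) :=
  let r := pvBLoop data 0
  if r.2 > 1 then r.1 else data

-- ===== PRECONDITION & SPEC =====
-- Pre_ excludes exactly the inputs on which A raises KeyError: some item lacks the key 'pos_cliente'.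
def Pre_rename_pos_cliente2 (data : List (List (String × String))) : Prop :=
  (data.all (fun item => (PySem.Dict.mk item).contains "pos_cliente")) = true
instance (data : List (List (String × String))) : Decidable (Pre_rename_pos_cliente2 data) := by unfold Pre_rename_pos_cliente2; infer_instance

def pvWitness_rename_pos_cliente2 : (List (List (String × String))) :=
  [[("pos_cliente", "F1sxLavand")], [("pos_cliente", "F1sxLavand"), ("x", "y")], [("pos_cliente", "a")]]

def Spec_rename_pos_cliente2 (data : List (List (String × String))) (out : List (List (String × String))) : Prop := out = rename_pos_cliente2_alt data
instance (data : List (List (String × String))) (out : List (List (String × String))) : Decidable (Spec_rename_pos_cliente2 data out) := by unfold Spec_rename_pos_cliente2; infer_instance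

-- ===== CLAIM (what is proved, stated in full; the proofs are below) =====
def Claim_equal_rename_pos_cliente2 : Prop := ∀ (data : List (List (String × String))), Dom_rename_pos_cliente2 data → Pre_rename_pos_cliente2 data → Spec_rename_pos_cliente2 data (rename_pos_cliente2 data)

-- ===== LEMMAS AND PROOFS =====

-- the copy B builds is exactly A's renaming pass (counter offset by one)
theorem pvBLoop_fst (data : List (List (String × String))) (n : Int) :
    (pvBLoop data n).1 = pvALoop data (n + 1) := by
  induction data generalizing n with
  | nil => rfl
  | cons x rest ih =>
    by_cases h : pvIsMatch x <;> simp [pvBLoop, pvALoop, h, ih]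

-- B's count agrees with A's foldl count (both are start + number of matches)
theorem pvBLoop_snd_eq_foldl (data : List (List (String × String))) (n : Int) :
    (pvBLoop data n).2 = data.foldl (fun acc item => if pvIsMatch item then acc + 1 else acc) n := by
  induction data generalizing n with
  | nil => rfl
  | cons x rest ih =>
    by_cases h : pvIsMatch x <;> simp [pvBLoop, List.foldl, h, ih]

-- ===== VERDICT (by name: the statement is the Claim_ definition above) =====
theorem rename_pos_cliente2_spec : Claim_equal_rename_pos_cliente2 := by
  intro data _ _
  show rename_pos_cliente2 data = rename_pos_cliente2_alt data
  simp only [rename_pos_cliente2, rename_pos_cliente2_alt, pvBLoop_fst, pvBLoop_snd_eq_foldl,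
    zero_add]
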